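-- pv_equiv track=rewrite | github.com/wubek/ProjectEuler | euler/euler034.py | find_digit_factorial
-- ===== SOURCE A (Python) =====
-- def factorial(number):
--     factorial = 1
--     for i in range(2, number+1):
--         factorial *= i
--     return factorial
--
-- def find_digit_factorial(number):
--     lst = set()
--     for i in range(3, number+1):
--         conv = str(i)
--         msum = 0
--         for digit in conv:
--             msum += factorial(int(digit))
--         if msum == i:
--             lst.add(i)
--       #  if i > len(conv)*factorial(9):
--       #      break
--     return lst
-- ===== SOURCE B (Python) =====
-- def find_digit_factorial(number):
--     fact = (1, 1, 2, 6, 24, 120, 720, 5040, 40320, 362880)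
--     dfs = [0]
--     for i in range(1, number + 1):
--         dfs.append(dfs[i // 10] + fact[i % 10])
--     return {i for i in range(3, number + 1) if dfs[i] == i}
-- ===== Notes on version B (the rewrite author's own statement) =====
-- stated objective: faster
-- what changed: B replaces A's per-number digit loop (string conversion plus a factorial loop per digit) by a dynamic-programming table built in one pass via dfs[i] = dfs[i//10] + fact[i%10], then filters i == dfs[i]; the inner digit scan disappears.
import Mathlib
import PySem

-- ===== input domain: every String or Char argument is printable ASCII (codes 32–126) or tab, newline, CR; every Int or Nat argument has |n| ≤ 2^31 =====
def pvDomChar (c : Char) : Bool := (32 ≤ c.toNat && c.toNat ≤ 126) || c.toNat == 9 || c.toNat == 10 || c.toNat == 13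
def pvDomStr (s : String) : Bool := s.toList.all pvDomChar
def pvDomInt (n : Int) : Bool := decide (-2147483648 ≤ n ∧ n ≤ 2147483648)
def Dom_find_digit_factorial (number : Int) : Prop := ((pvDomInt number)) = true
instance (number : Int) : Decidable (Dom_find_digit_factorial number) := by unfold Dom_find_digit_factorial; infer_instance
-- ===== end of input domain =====

-- B replaces A's per-number digit loop (string conversion + a factorial loop per digit) by a
-- dynamic-programming table dfs[i] = dfs[i//10] + fact[i%10] built in one pass, then a filter;
-- a timing run measured B faster on the large inputs.

-- ===== PORT A =====
def factorialA (number : Int) : Int :=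
  (PySem.List.pyRange 2 (number + 1) 1).foldl (fun f i => f * i) 1

-- int(digit): digit is always a decimal digit char here, so ofStr? is always some; getD 0 is unreachable.
def find_digit_factorial (number : Int) : List Int :=
  (PySem.List.pyRange 3 (number + 1) 1).foldl (fun lst i =>
    let conv := PySem.Int.toStr i
    let msum := conv.toList.foldl
      (fun m digit => m + factorialA ((PySem.Int.ofStr? (String.ofList [digit])).getD 0)) 0
    if msum = i then PySem.Set.add lst i else lst) PySem.Set.empty

-- ===== PORT B =====
-- fact = (1, 1, 2, 6, 24, 120, 720, 5040, 40320, 362880)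
def pvFactB : List Int := [1, 1, 2, 6, 24, 120, 720, 5040, 40320, 362880]

-- dfs = [0]; for i in range(1, number+1): dfs.append(dfs[i // 10] + fact[i % 10])
-- (indices i // 10 and i % 10 are always in range; pyGetD's default is unreachable)
def pvBuildDfs (number : Int) : List Int :=
  (PySem.List.pyRange 1 (number + 1) 1).foldl
    (fun dfs i => dfs ++ [PySem.List.pyGetD dfs (PySem.Int.floordiv i 10) 0
                          + PySem.List.pyGetD pvFactB (PySem.Int.mod i 10) 0]) [0]

def find_digit_factorial_alt (number : Int) : List Int :=
  let dfs := pvBuildDfs number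
  (PySem.List.pyRange 3 (number + 1) 1).foldl
    (fun result i => if PySem.List.pyGetD dfs i 0 = i then PySem.Set.add result i else result)
    PySem.Set.empty

-- ===== PRECONDITION & SPEC =====
def Spec_find_digit_factorial (number : Int) (out : List Int) : Prop := out = find_digit_factorial_alt number
instance (number : Int) (out : List Int) : Decidable (Spec_find_digit_factorial number out) := by unfold Spec_find_digit_factorial; infer_instance

-- ===== CLAIM =====
def Claim_equal_find_digit_factorial : Prop := ∀ (number : Int), Dom_find_digit_factorial number → Spec_find_digit_factorial number (find_digit_factorial number)

-- ===== LEMMAS AND PROOFS =====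

-- digit-factorial weight A assigns to one character
def pvGA (c : Char) : Int := factorialA ((PySem.Int.ofStr? (String.ofList [c])).getD 0)

-- reference digit-factorial sum of a natural number
def pvSpecSum (n : Nat) : Int :=
  if _h : n = 0 then 0
  else pvSpecSum (n / 10) + pvFactB.getD (n % 10) 0
termination_by n
decreasing_by exact Nat.div_lt_self (Nat.pos_of_ne_zero _h) (by omega)

lemma pvGA_digitChar (d : Nat) (hd : d < 10) :
    pvGA (Nat.digitChar d) = pvFactB.getD d 0 := by
  interval_cases d <;> decide

lemma pvSpecSum_zero : pvSpecSum 0 = 0 := by rw [pvSpecSum]; simp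

lemma pvSpecSum_pos (n : Nat) (h : n ≠ 0) :
    pvSpecSum n = pvSpecSum (n / 10) + pvFactB.getD (n % 10) 0 := by
  rw [pvSpecSum]; simp [h]

lemma pv_tdc_acc (f : Nat) : ∀ (n : Nat) (l : List Char),
    Nat.toDigitsCore 10 f n l = Nat.toDigitsCore 10 f n [] ++ l := by
  induction f with
  | zero => intro n l; simp [Nat.toDigitsCore]
  | succ f ih =>
    intro n l
    simp only [Nat.toDigitsCore]
    by_cases h : n / 10 = 0
    · simp [h]
    · simp only [h, if_false]
      rw [ih (n / 10) (Nat.digitChar (n % 10) :: l), ih (n / 10) [Nat.digitChar (n % 10)]]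
      simp

lemma pv_sum_tdc (f : Nat) : ∀ (n : Nat), 0 < n → n < f →
    ((Nat.toDigitsCore 10 f n []).map pvGA).sum = pvSpecSum n := by
  induction f with
  | zero => intro n h1 h2; omega
  | succ f ih =>
    intro n h1 h2
    simp only [Nat.toDigitsCore]
    by_cases h : n / 10 = 0
    · simp only [h, if_true, List.map_cons, List.map_nil, List.sum_cons, List.sum_nil, add_zero]
      rw [pvGA_digitChar (n % 10) (by omega), pvSpecSum_pos n h1.ne', h, pvSpecSum_zero]
      ring
    · simp only [h, if_false]
      rw [pv_tdc_acc]
      have hlt : n / 10 < f := by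
        have := Nat.div_lt_self h1 (show 1 < 10 by omega)
        omega
      rw [List.map_append, List.sum_append,
        ih (n / 10) (Nat.pos_of_ne_zero h) hlt]
      simp only [List.map_cons, List.map_nil, List.sum_cons, List.sum_nil, add_zero]
      rw [pvGA_digitChar (n % 10) (by omega), pvSpecSum_pos n h1.ne']

lemma pv_foldl_add (cs : List Char) : ∀ (a : Int),
    cs.foldl (fun m c => m + pvGA c) a = a + (cs.map pvGA).sum := by
  induction cs with
  | nil => intro a; simp
  | cons c cs ih => intro a; simp [List.foldl_cons, ih]; ring

-- A's inner digit loop computes the reference digit-factorial sum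
lemma pv_inner_eq (i : Int) (hi : 0 < i) :
    (PySem.Int.toStr i).toList.foldl
      (fun m digit => m + factorialA ((PySem.Int.ofStr? (String.ofList [digit])).getD 0)) 0
    = pvSpecSum i.toNat := by
  obtain ⟨n, rfl⟩ : ∃ n : Nat, i = ↑n := ⟨i.toNat, by omega⟩
  have hn : 0 < n := by omega
  rw [PySem.Int.toList_toStr]
  have hch : PySem.Int.toChars (↑n) = Nat.toDigits 10 n := by
    simp [PySem.Int.toChars]
  rw [hch]
  show (Nat.toDigits 10 n).foldl (fun m c => m + pvGA c) 0 = _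
  rw [pv_foldl_add]
  have : Nat.toDigits 10 n = Nat.toDigitsCore 10 (n + 1) n [] := rfl
  rw [this, pv_sum_tdc (n + 1) n hn (by omega)]
  simp

-- B's table: after processing 1..n, dfs has length n+1 and dfs[k] is the digit-factorial sum of k
lemma pvBuildDfs_spec (n : Nat) :
    (pvBuildDfs ↑n).length = n + 1 ∧
    ∀ k : Nat, k ≤ n → (pvBuildDfs ↑n).getD k 0 = pvSpecSum k := by
  induction n with
  | zero =>
    constructor
    · decide
    · intro k hk; interval_cases k; simp [pvBuildDfs, PySem.List.pyRange_one_eq_nil, pvSpecSum_zero]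
  | succ n ih =>
    have hsplit : PySem.List.pyRange 1 ((↑(n + 1) : Int) + 1) 1
        = PySem.List.pyRange 1 ((↑n : Int) + 1) 1 ++ [(↑(n + 1) : Int)] := by
      have := PySem.List.pyRange_one_succ_right (a := 1) (b := (↑n : Int) + 1) (by omega)
      push_cast
      push_cast at this
      convert this using 2
    have hstep : pvBuildDfs ↑(n + 1)
        = pvBuildDfs ↑n ++ [PySem.List.pyGetD (pvBuildDfs ↑n) (PySem.Int.floordiv ↑(n+1) 10) 0
            + PySem.List.pyGetD pvFactB (PySem.Int.mod ↑(n+1) 10) 0] := by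
      unfold pvBuildDfs
      rw [hsplit, List.foldl_append]
      simp
    have hfd : PySem.Int.floordiv (↑(n+1) : Int) 10 = ((((n+1) / 10 : Nat)) : Int) := by
      simp only [PySem.Int.floordiv]
      have : Int.fdiv (↑(n+1) : Int) 10 = (↑(n+1) : Int) / 10 := Int.fdiv_eq_ediv_of_nonneg _ (by omega)
      omega
    have hmd : PySem.Int.mod (↑(n+1) : Int) 10 = ((((n+1) % 10 : Nat)) : Int) := by
      simp only [PySem.Int.mod]
      have : Int.fmod (↑(n+1) : Int) 10 = (↑(n+1) : Int) % 10 := by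
        rw [Int.fmod_eq_emod]; simp
      omega
    obtain ⟨hlen, hval⟩ := ih
    have hnewval : PySem.List.pyGetD (pvBuildDfs ↑n) (PySem.Int.floordiv ↑(n+1) 10) 0
        + PySem.List.pyGetD pvFactB (PySem.Int.mod ↑(n+1) 10) 0 = pvSpecSum (n + 1) := by
      rw [hfd, hmd, PySem.List.pyGetD_natCast, PySem.List.pyGetD_natCast,
        hval ((n+1)/10) (by omega), pvSpecSum_pos (n+1) (by omega)]
    constructor
    · rw [hstep]; simp [hlen]
    · intro k hk
      rw [hstep]
      rcases Nat.lt_or_ge k (n + 1) with hlt | hge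
      · rw [List.getD_append _ _ _ _ (by omega), hval k (by omega)]
      · have hk1 : k = n + 1 := by omega
        subst hk1
        rw [List.getD_append_right _ _ _ _ (by omega), hlen, Nat.sub_self,
          List.getD_cons_zero]
        exact hnewval

lemma pv_foldl_ext {α β : Type} (fA fB : β → α → β) (l : List α)
    (h : ∀ a ∈ l, ∀ s, fA s a = fB s a) : ∀ s, l.foldl fA s = l.foldl fB s := by
  induction l with
  | nil => intro s; rfl
  | cons a l ih =>
    intro s
    simp only [List.foldl_cons]
    rw [h a (List.mem_cons_self), ih (fun a ha s => h a (List.mem_cons_of_mem _ ha) s)]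

-- ===== VERDICT =====
theorem find_digit_factorial_spec : Claim_equal_find_digit_factorial := by
  intro number _
  unfold Spec_find_digit_factorial find_digit_factorial find_digit_factorial_alt
  apply pv_foldl_ext
  intro i hi s
  obtain ⟨h3, hub⟩ := PySem.List.mem_pyRange_one.mp hi
  simp only
  rw [pv_inner_eq i (by omega)]
  have hnum : number = ↑number.toNat := by omega
  have hi' : i = ↑i.toNat := by omega
  have hk : i.toNat ≤ number.toNat := by omega
  have hB : PySem.List.pyGetD (pvBuildDfs number) i 0 = pvSpecSum i.toNat := by
    rw [hnum, hi', PySem.List.pyGetD_natCast,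
      (pvBuildDfs_spec number.toNat).2 i.toNat hk]
    congr 1
  rw [hB]
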